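-- pv_equiv track=rewrite | github.com/william-vw/fun3 | python/n3/fun/gen.py | _deduplicate_vars
-- ===== SOURCE A (Python) =====
-- from collections import Counter
--
-- def _deduplicate_vars(vars):
--     dupls = { v for v,c in Counter(vars).items() if c > 1 }
--
--     new_vars = []; uniq_vars = { v:[] for v in dupls }
--     for v in vars:
--         if v in dupls:
--             nv = f"{v}_o{len(uniq_vars[v])}"
--             new_vars.append(nv); uniq_vars[v].append(nv)
--         else:
--             new_vars.append(v)
--
--     return ( new_vars, uniq_vars )
-- ===== SOURCE B (Python) =====
-- from collections import Counter
--
-- def _deduplicate_vars(vs):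
--     total = Counter(vs)
--     new_vars = [f"{v}_o{vs[:i].count(v)}" if total[v] > 1 else v
--                 for i, v in enumerate(vs)]
--     uniq_vars = {v: [f"{v}_o{k}" for k in range(c)]
--                  for v, c in total.items() if c > 1}
--     return (new_vars, uniq_vars)
-- ===== Notes on version B (the rewrite author's own statement) =====
-- stated objective: alternative
-- what changed: A's single stateful pass (a running dict of already-assigned suffix lists consulted for the next suffix number) is replaced by closed-form comprehensions: each position's suffix is the count of that variable in the preceding prefix, and each uniq_vars list is generated directly from the Counter total; no accumulating dict of lists is maintained.
import Mathlib
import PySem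

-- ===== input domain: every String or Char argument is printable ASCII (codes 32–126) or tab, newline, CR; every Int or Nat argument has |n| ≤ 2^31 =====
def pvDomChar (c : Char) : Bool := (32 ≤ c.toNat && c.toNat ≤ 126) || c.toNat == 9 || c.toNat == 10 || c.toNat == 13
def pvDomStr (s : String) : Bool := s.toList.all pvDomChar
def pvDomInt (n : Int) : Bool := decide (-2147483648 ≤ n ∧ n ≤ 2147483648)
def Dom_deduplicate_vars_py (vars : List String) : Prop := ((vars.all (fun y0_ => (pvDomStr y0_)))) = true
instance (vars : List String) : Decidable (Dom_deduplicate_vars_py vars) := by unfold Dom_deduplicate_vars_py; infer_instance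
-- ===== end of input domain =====

-- B replaces A's single accumulating pass (running dict of suffix lists) by closed-form
-- comprehensions: occurrence index = count in the prefix, uniq lists generated from Counter totals.

-- ===== PORT A =====
-- one loop step of A: append renamed/plain var, extend the per-var suffix list
def dedupStepA (dupls : List String)
    (st : List String × PySem.Dict String (List String)) (v : String) :
    List String × PySem.Dict String (List String) :=
  if dupls.contains v then
    let nv := v ++ "_o" ++ PySem.Int.toStr ((st.2.getD v []).length : Int)
    (st.1 ++ [nv], st.2.insert v (st.2.getD v [] ++ [nv]))
  else
    (st.1 ++ [v], st.2)

def deduplicate_vars_py (vars : List String) : List String × (List (String × List String)) :=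
  let dupls : List String :=
    PySem.Set.ofList (((PySem.Dict.counter vars).items.filter (fun p => decide (1 < p.2))).map (·.1))
  let uniq0 : PySem.Dict String (List String) :=
    dupls.foldl (fun d v => d.insert v []) PySem.Dict.empty
  let st := vars.foldl (dedupStepA dupls) ([], uniq0)
  (st.1, st.2.items)

-- ===== PORT B =====
def deduplicate_vars_py_alt (vars : List String) : List String × (List (String × List String)) :=
  let total := PySem.Dict.counter vars
  let new_vars := (PySem.List.enumerate vars).map (fun p =>
    if 1 < total.getD p.2 0 then
      p.2 ++ "_o" ++ PySem.Int.toStr (((PySem.List.slice vars none (some p.1)).count p.2 : Nat) : Int)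
    else p.2)
  let uniq := (total.items.filter (fun p => decide (1 < p.2))).foldl
    (fun (d : PySem.Dict String (List String)) p =>
      d.insert p.1 ((PySem.List.pyRange 0 p.2).map (fun k => p.1 ++ "_o" ++ PySem.Int.toStr k)))
    PySem.Dict.empty
  (new_vars, uniq.items)

-- ===== PRECONDITION & SPEC =====
def Spec_deduplicate_vars_py (vars : List String) (out : List String × (List (String × List String))) : Prop := out = deduplicate_vars_py_alt vars
instance (vars : List String) (out : List String × (List (String × List String))) : Decidable (Spec_deduplicate_vars_py vars out) := by unfold Spec_deduplicate_vars_py; infer_instance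

-- ===== CLAIM (what is proved, stated in full; the proofs are below) =====
def Claim_equal_deduplicate_vars_py : Prop := ∀ (vars : List String), Dom_deduplicate_vars_py vars → Spec_deduplicate_vars_py vars (deduplicate_vars_py vars)

-- ===== LEMMAS AND PROOFS =====

-- the duplicated variables, in first-occurrence order
def dupSet (vars : List String) : List String :=
  (PySem.Set.ofList vars).filter (fun v => decide (1 < (vars.count v : Int)))

-- canonical new_vars after processing prefix p
def labN (vars p : List String) : List String :=
  (PySem.List.enumerate p).map (fun q =>
    if 1 < (vars.count q.2 : Int) then
      q.2 ++ "_o" ++ PySem.Int.toStr ((p.take q.1.toNat).count q.2 : Int)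
    else q.2)

-- canonical uniq_vars dict after processing prefix p
def labU (vars p : List String) : PySem.Dict String (List String) :=
  PySem.Dict.mk ((dupSet vars).map (fun v =>
    (v, (PySem.List.pyRange 0 (p.count v : Int)).map (fun k => v ++ "_o" ++ PySem.Int.toStr k))))

theorem nodup_dupSet (vars : List String) : (dupSet vars).Nodup :=
  (PySem.Set.nodup_ofList vars).filter _

theorem mem_dupSet (vars : List String) (v : String) :
    v ∈ dupSet vars ↔ v ∈ vars ∧ 1 < (vars.count v : Int) := by
  simp [dupSet, List.mem_filter, PySem.Set.mem_ofList]

theorem dupls_eq (vars : List String) :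
    PySem.Set.ofList (((PySem.Dict.counter vars).items.filter (fun p => decide (1 < p.2))).map (·.1))
      = dupSet vars := by
  rw [PySem.Dict.items_counter, List.filter_map, List.map_map]
  have h1 : ((fun (x : String × Int) => x.1) ∘ (fun k => (k, (vars.count k : Int)))) = id := rfl
  rw [h1, List.map_id]
  have h2 : ((fun (p : String × Int) => decide (1 < p.2)) ∘ (fun k => (k, (vars.count k : Int))))
      = fun v => decide (1 < (vars.count v : Int)) := rfl
  rw [h2]
  exact PySem.Set.ofList_eq_self_of_nodup _ ((PySem.Set.nodup_ofList vars).filter _)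

theorem keys_labU (vars p : List String) : (labU vars p).keys = dupSet vars := by
  rw [labU, PySem.Dict.keys_mk, List.map_map]
  exact List.map_id _

theorem getD_labU (vars p : List String) (v : String) (h : v ∈ dupSet vars) :
    (labU vars p).getD v []
      = (PySem.List.pyRange 0 (p.count v : Int)).map (fun k => v ++ "_o" ++ PySem.Int.toStr k) := by
  apply PySem.Dict.getD_of_mem_items
  · exact List.mem_map_of_mem h
  · rw [keys_labU]; exact nodup_dupSet vars

theorem labN_append (vars p : List String) (v : String) :
    labN vars (p ++ [v])
      = labN vars p ++ [if 1 < (vars.count v : Int) then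
          v ++ "_o" ++ PySem.Int.toStr (p.count v : Int) else v] := by
  rw [labN, PySem.List.enumerate_append, List.map_append]
  congr 1
  · apply List.map_congr_left
    intro q hq
    rw [PySem.List.mem_enumerate_iff] at hq
    obtain ⟨k, hk, rfl⟩ := hq
    simp only [zero_add, Int.toNat_natCast]
    rw [List.take_append_of_le_length (le_of_lt hk)]
  · simp [PySem.List.enumerate_cons, PySem.List.enumerate_nil]

theorem uniq0_eq (vars : List String) :
    (dupSet vars).foldl (fun d v => d.insert v []) PySem.Dict.empty = labU vars [] := by
  apply PySem.Dict.ext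
  rw [PySem.Dict.items_foldl_insert_fresh (dupSet vars) (fun v => v) (fun _ => []) _
        (fun a _ => by simp [PySem.Dict.contains_empty]) (by simpa using nodup_dupSet vars)]
  simp [labU, PySem.List.pyRange_one_eq_nil, PySem.Dict.empty]

theorem stepA_eq (vars p : List String) (v : String) (hv : v ∈ vars) :
    dedupStepA (dupSet vars) (labN vars p, labU vars p) v
      = (labN vars (p ++ [v]), labU vars (p ++ [v])) := by
  have hmemiff : (dupSet vars).contains v = true ↔ (1 < (vars.count v : Int)) := by
    rw [List.contains_iff_mem, mem_dupSet]
    exact ⟨fun h => h.2, fun h => ⟨hv, h⟩⟩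
  rw [dedupStepA]
  by_cases hd : 1 < (vars.count v : Int)
  · rw [if_pos (hmemiff.mpr hd)]
    have hmem : v ∈ dupSet vars := (mem_dupSet vars v).mpr ⟨hv, hd⟩
    rw [getD_labU vars p v hmem]
    have hc : (0:Int) ≤ (p.count v : Int) := Int.natCast_nonneg _
    have hlen : ((((PySem.List.pyRange 0 (p.count v : Int)).map
        (fun k => v ++ "_o" ++ PySem.Int.toStr k)).length : Int)) = (p.count v : Int) := by
      simp [PySem.List.length_pyRange_one]
    rw [labN_append, if_pos hd]
    simp only [hlen]
    congr 1
    have hsucc : (((p ++ [v]).count v : Nat) : Int) = (p.count v : Int) + 1 := by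
      simp [List.count_append]
    apply PySem.Dict.ext
    have hcont : (labU vars p).contains v = true := by
      rw [PySem.Dict.contains_iff_mem_keys, keys_labU]; exact hmem
    rw [PySem.Dict.items_insert_of_contains _ _ hcont]
    simp only [labU, List.map_map]
    apply List.map_congr_left
    intro w hw
    simp only [Function.comp]
    by_cases hwv : w = v
    · subst hwv
      rw [if_pos (by simp), hsucc, PySem.List.pyRange_one_succ_right hc, List.map_append]
      simp
    · rw [if_neg (by simp [hwv])]
      have hcw : ((p ++ [v]).count w) = p.count w := by
        simp [List.count_append, Ne.symm hwv]
      rw [hcw]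
  · rw [if_neg (fun h => hd (hmemiff.mp h))]
    rw [labN_append, if_neg hd]
    congr 1
    have hnv : v ∉ dupSet vars := fun h => hd ((mem_dupSet vars v).mp h).2
    simp only [labU]
    congr 1
    apply List.map_congr_left
    intro w hw
    have hwv : w ≠ v := fun h => hnv (h ▸ hw)
    have hcw : ((p ++ [v]).count w) = p.count w := by
      simp [List.count_append, Ne.symm hwv]
    rw [hcw]

theorem loopA (vars : List String) :
    ∀ (rest pre : List String), vars = pre ++ rest →
      rest.foldl (dedupStepA (dupSet vars)) (labN vars pre, labU vars pre)
        = (labN vars vars, labU vars vars) := by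
  intro rest
  induction rest with
  | nil => intro pre h; simp at h; rw [List.foldl_nil, h]
  | cons v t ih =>
    intro pre h
    rw [List.foldl_cons,
      stepA_eq vars pre v (by rw [h]; exact List.mem_append_right _ (List.mem_cons_self))]
    exact ih (pre ++ [v]) (by rw [h, List.append_assoc]; rfl)

theorem A_eq (vars : List String) :
    deduplicate_vars_py vars = (labN vars vars, (labU vars vars).items) := by
  rw [deduplicate_vars_py]
  simp only [dupls_eq, uniq0_eq]
  have h0 : (([] : List String), labU vars []) = (labN vars [], labU vars []) := by
    simp [labN, PySem.List.enumerate_nil]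
  rw [h0, loopA vars vars [] rfl]

theorem B_eq (vars : List String) :
    deduplicate_vars_py_alt vars = (labN vars vars, (labU vars vars).items) := by
  rw [deduplicate_vars_py_alt]
  congr 1
  · rw [labN]
    apply List.map_congr_left
    intro q hq
    rw [PySem.List.mem_enumerate_iff] at hq
    obtain ⟨k, hk, rfl⟩ := hq
    simp only [zero_add, Int.toNat_natCast, PySem.Dict.getD_counter,
      PySem.List.slice_to_natCast]
  · rw [PySem.Dict.items_counter, List.filter_map]
    have h2 : ((fun (p : String × Int) => decide (1 < p.2)) ∘ (fun k => (k, (vars.count k : Int))))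
        = fun v => decide (1 < (vars.count v : Int)) := rfl
    rw [h2]
    rw [show ((PySem.Set.ofList vars).filter (fun v => decide (1 < (vars.count v : Int))))
          = dupSet vars from rfl]
    rw [PySem.Dict.items_foldl_insert_fresh
      ((dupSet vars).map (fun k => (k, ((vars.count k : Nat) : Int))))
      (fun p => p.1)
      (fun p => (PySem.List.pyRange 0 p.2).map (fun k => p.1 ++ "_o" ++ PySem.Int.toStr k))
      PySem.Dict.empty
      (fun a _ => by simp [PySem.Dict.contains_empty])
      (by
        have hid : ((fun (p : String × Int) => p.1) ∘ fun k => (k, ((vars.count k : Nat) : Int))) = id := rfl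
        rw [List.map_map, hid, List.map_id]; exact nodup_dupSet vars)]
    simp [labU, PySem.Dict.empty, List.map_map, Function.comp]

-- ===== VERDICT (by name: the statement is the Claim_ definition above) =====
theorem deduplicate_vars_py_spec : Claim_equal_deduplicate_vars_py := by
  intro vars _
  unfold Spec_deduplicate_vars_py
  rw [A_eq, B_eq]
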